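-- pv_equiv track=rewrite | github.com/Ashiq-am/Path-of-Python | 1.Python Basics/Python Basics Articles/Check if all the 1s in a binary string are equidistant or not in Python/1.Brute Force Approach.py | are_1s_equidistant
-- ===== SOURCE A (Python) =====
-- def are_1s_equidistant(s):
--     # Find positions of 1s
--     positions = [i for i, char in enumerate(s) if char == '1']
--
--     # Check if less than 2 1s
--     if len(positions) < 2:
--         return True
--
--     # Calculate distance
--     distance = positions[1] - positions[0]
--
--     # Iterate over remaining 1s
--     for i in range(2, len(positions)):
--         #  Compare distances
--         if positions[i] - positions[i - 1] != distance:
--             return False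
--
--     return True
-- ===== SOURCE B (Python) =====
-- def are_1s_equidistant(s):
--     # Split on '1': the chunks strictly between consecutive 1s must all be equally long.
--     inner = s.split('1')[1:-1]
--     return all(len(p) == len(inner[0]) for p in inner) if inner else True
-- ===== Notes on version B (the rewrite author's own statement) =====
-- stated objective: faster
-- what changed: B never computes positions of 1s at all: it splits the string at the 1-characters (one C-level str.split) and checks that the chunks strictly between consecutive ones all have equal length, instead of A's build-positions-list-then-scan-index-gaps approach; a timing run measured a constant-factor speedup.
import Mathlib
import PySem

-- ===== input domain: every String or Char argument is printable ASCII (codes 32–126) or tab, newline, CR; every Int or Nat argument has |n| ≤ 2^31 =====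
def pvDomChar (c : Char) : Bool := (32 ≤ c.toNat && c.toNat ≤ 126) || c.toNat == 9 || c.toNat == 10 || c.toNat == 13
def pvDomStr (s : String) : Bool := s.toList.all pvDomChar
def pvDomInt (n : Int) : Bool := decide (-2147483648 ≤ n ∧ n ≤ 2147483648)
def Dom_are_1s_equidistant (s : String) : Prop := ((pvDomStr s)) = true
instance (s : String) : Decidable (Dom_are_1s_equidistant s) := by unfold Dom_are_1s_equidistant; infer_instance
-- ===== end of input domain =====

-- B replaces A's positions-list gap scan by splitting the string at the 1-characters and
-- checking that all chunks strictly between consecutive 1s have equal length (measured constant-factor faster).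


-- ===== PORT A =====
-- for i in range(2, len(positions)): if positions[i] - positions[i-1] != distance: return False
def pvALoop (positions : List Int) (distance : Int) (i : Nat) : Bool :=
  if _h : i < positions.length then
    if positions.getD i 0 - positions.getD (i - 1) 0 ≠ distance then false
    else pvALoop positions distance (i + 1)
  else true
termination_by positions.length - i

def are_1s_equidistant (s : String) : Bool :=
  let positions : List Int :=
    (PySem.List.enumerate s.toList).filterMap
      (fun p => if p.2 = '1' then some p.1 else none)
  if positions.length < 2 then true
  else
    let distance := positions.getD 1 0 - positions.getD 0 0
    pvALoop positions distance 2

-- ===== PORT B =====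
-- inner = s.split('1')[1:-1]; return all(len(p) == len(inner[0]) for p in inner) if inner else True
def are_1s_equidistant_alt (s : String) : Bool :=
  match PySem.Str.split? s "1" with
  | none => true   -- unreachable: the separator "1" is nonempty
  | some parts =>
    let inner := PySem.List.slice parts (some 1) (some (-1))
    match inner with
    | [] => true
    | p :: _ => inner.all (fun q => PySem.Str.len q == PySem.Str.len p)

-- ===== PRECONDITION & SPEC =====
def Spec_are_1s_equidistant (s : String) (out : Bool) : Prop := out = are_1s_equidistant_alt s
instance (s : String) (out : Bool) : Decidable (Spec_are_1s_equidistant s out) := by unfold Spec_are_1s_equidistant; infer_instance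

-- ===== CLAIM (what is proved, stated in full; the proofs are below) =====
def Claim_equal_are_1s_equidistant : Prop := ∀ (s : String), Dom_are_1s_equidistant s → Spec_are_1s_equidistant s (are_1s_equidistant s)

-- ===== LEMMAS AND PROOFS =====

/-- positions of '1' in `cs`, the first one labelled `i`. -/
def pvPos (i : Int) : List Char → List Int
  | [] => []
  | c :: r => if c = '1' then i :: pvPos (i + 1) r else pvPos (i + 1) r

/-- gap check on a positions tail: every element is `d` after its predecessor. -/
def pvGaps (p d : Int) : List Int → Bool
  | [] => true
  | q :: r => if q - p ≠ d then false else pvGaps q d r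

/-- prepend `x` to the first segment. -/
def pvConsHead (x : List Char) : List (List Char) → List (List Char)
  | [] => [x]
  | p :: ps => (x ++ p) :: ps

/-- simple recursive model of `s.split('1')`. -/
def pvSplit : List Char → List (List Char)
  | [] => [[]]
  | c :: r => if c = '1' then [] :: pvSplit r else pvConsHead [c] (pvSplit r)

/-- positions of the 1s, read off the split segments (first label `i`). -/
def pvPosOf (i : Int) : List (List Char) → List Int
  | [] => []
  | [_] => []
  | p :: ps => (i + p.length) :: pvPosOf (i + (p.length : Int) + 1) ps

/-- what both programs compute, read off the split segments. -/
def pvInnerCheck : List (List Char) → Bool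
  | _ :: b :: rest =>
      if rest = [] then true
      else (rest.dropLast).all (fun q => q.length == b.length)
  | _ => true

lemma pvSplit_ne_nil (cs : List Char) : pvSplit cs ≠ [] := by
  cases cs with
  | nil => simp [pvSplit]
  | cons c r =>
    by_cases h : c = '1'
    · simp [pvSplit, h]
    · simp only [pvSplit, h, if_neg, not_false_iff]
      cases pvSplit r <;> simp [pvConsHead]

lemma pvConsHead_nil (ps : List (List Char)) (h : ps ≠ []) : pvConsHead [] ps = ps := by
  cases ps with
  | nil => exact absurd rfl h
  | cons p t => simp [pvConsHead]

lemma pvConsHead_append (x : List Char) (c : Char) (ps : List (List Char)) :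
    pvConsHead (x ++ [c]) ps = pvConsHead x (pvConsHead [c] ps) := by
  cases ps <;> simp [pvConsHead]

lemma pvGo_eq (l : List Char) (fuel : Nat) (cur : List Char) (acc : List (List Char))
    (h : l.length < fuel) :
    PySem.Chars.splitOn.go ['1'] fuel l cur acc
      = acc.reverse ++ pvConsHead cur.reverse (pvSplit l) := by
  induction l generalizing fuel cur acc with
  | nil =>
    match fuel with
    | f + 1 => simp [PySem.Chars.splitOn.go, pvSplit, pvConsHead]
  | cons c r ih =>
    match fuel, h with
    | f + 1, h =>
      have hr : r.length < f := by simpa using h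
      by_cases hc : c = '1'
      · have hpre : List.isPrefixOf ['1'] (c :: r) = true := by
          simp [List.isPrefixOf, hc]
        rw [show PySem.Chars.splitOn.go ['1'] (f + 1) (c :: r) cur acc
              = PySem.Chars.splitOn.go ['1'] f (List.drop (['1'] : List Char).length (c :: r)) [] (cur.reverse :: acc) by
            simp [PySem.Chars.splitOn.go, hpre]]
        simp only [List.length_singleton, List.drop_succ_cons, List.drop_zero]
        rw [ih f [] (cur.reverse :: acc) hr]
        simp only [List.reverse_nil]
        rw [pvConsHead_nil _ (pvSplit_ne_nil r)]
        simp [pvSplit, hc, pvConsHead]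
      · have hpre : List.isPrefixOf ['1'] (c :: r) = false := by
          simp [List.isPrefixOf]
          intro h'; exact absurd h'.symm hc
        rw [show PySem.Chars.splitOn.go ['1'] (f + 1) (c :: r) cur acc
              = PySem.Chars.splitOn.go ['1'] f r (c :: cur) acc by
            simp [PySem.Chars.splitOn.go, hpre]]
        rw [ih f (c :: cur) acc hr]
        simp only [List.reverse_cons, pvSplit, hc, if_neg, not_false_iff]
        rw [pvConsHead_append]

lemma pvSplitOn_eq (cs : List Char) : PySem.Chars.splitOn cs ['1'] = pvSplit cs := by
  rw [show PySem.Chars.splitOn cs ['1'] = PySem.Chars.splitOn.go ['1'] (cs.length + 1) cs [] [] from rfl]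
  rw [pvGo_eq cs (cs.length + 1) [] [] (by omega)]
  simp [pvConsHead_nil _ (pvSplit_ne_nil cs)]

lemma pvPos_filterMap (cs : List Char) (i : Int) :
    (PySem.List.enumerate cs i).filterMap
      (fun p => if p.2 = '1' then some p.1 else none) = pvPos i cs := by
  induction cs generalizing i with
  | nil => simp [PySem.List.enumerate_nil, pvPos]
  | cons c r ih =>
    simp only [PySem.List.enumerate_cons, List.filterMap_cons, pvPos]
    by_cases h : c = '1' <;> simp [h, ih]

lemma pvPos_eq_posOf (cs : List Char) (i : Int) :
    pvPos i cs = pvPosOf i (pvSplit cs) := by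
  induction cs generalizing i with
  | nil => simp [pvPos, pvSplit, pvPosOf]
  | cons c r ih =>
    obtain ⟨p, ps, hps⟩ := List.exists_cons_of_ne_nil (pvSplit_ne_nil r)
    by_cases h : c = '1'
    · simp only [pvPos, pvSplit, h, if_pos]
      rw [ih, hps]
      cases ps <;> simp [pvPosOf]
    · simp only [pvPos, pvSplit, h, if_neg, not_false_iff]
      rw [ih, hps]
      cases ps with
      | nil => simp [pvConsHead, pvPosOf]
      | cons q t =>
        simp only [pvConsHead, pvPosOf, List.length_append, List.length_cons, List.length_nil]
        push_cast
        try rw [show i + 1 + (p.length : Int) = i + (1 + (p.length : Int)) by ring]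

lemma pvPosOf_length (segs : List (List Char)) (i : Int) :
    (pvPosOf i segs).length = segs.length - 1 := by
  induction segs generalizing i with
  | nil => simp [pvPosOf]
  | cons p ps ih =>
    cases ps with
    | nil => simp [pvPosOf]
    | cons q t => simp [pvPosOf, ih]

lemma pvGaps_posOf (segs : List (List Char)) (q d : Int) :
    pvGaps q d (pvPosOf (q + 1) segs)
      = segs.dropLast.all (fun p => (1 + (p.length : Int)) == d) := by
  induction segs generalizing q with
  | nil => simp [pvPosOf, pvGaps]
  | cons p ps ih =>
    cases ps with
    | nil => simp [pvPosOf, pvGaps]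
    | cons b t =>
      simp only [pvPosOf, pvGaps, List.dropLast_cons_of_ne_nil (by simp : b :: t ≠ []),
        List.all_cons]
      by_cases hd : (q + 1 + (p.length : Int)) - q ≠ d
      · have : ((1 + (p.length : Int)) == d) = false := by
          simp only [beq_eq_false_iff_ne]; omega
        simp [hd, this]
      · have h1 : ((1 + (p.length : Int)) == d) = true := by
          simp only [beq_iff_eq]; omega
        simp only [hd, ite_false, h1, Bool.true_and]
        have := ih (q + (p.length : Int) + 1)
        rw [show q + 1 + (p.length : Int) = q + (p.length : Int) + 1 by ring]
        exact this

lemma pvALoop_eq (ps : List Int) (d : Int) (i : Nat) (hi : 1 ≤ i) :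
    pvALoop ps d i = pvGaps (ps.getD (i - 1) 0) d (ps.drop i) := by
  by_cases h : i < ps.length
  · have hdrop : ps.drop i = ps.getD i 0 :: ps.drop (i + 1) := by
      rw [List.drop_eq_getElem_cons h, List.getD_eq_getElem?_getD,
        List.getElem?_eq_getElem h, Option.getD_some]
    rw [pvALoop, dif_pos h, hdrop]
    show _ = if ps.getD i 0 - ps.getD (i - 1) 0 ≠ d then false
             else pvGaps (ps.getD i 0) d (ps.drop (i + 1))
    by_cases hne : ps.getD i 0 - ps.getD (i - 1) 0 ≠ d
    · rw [if_pos hne, if_pos hne]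
    · rw [if_neg hne, if_neg hne]
      have := pvALoop_eq ps d (i + 1) (by omega)
      simpa using this
  · rw [pvALoop, dif_neg h, List.drop_eq_nil_of_le (by omega)]
    rfl
termination_by ps.length - i

lemma pvA_eq (s : String) : are_1s_equidistant s = pvInnerCheck (pvSplit s.toList) := by
  unfold are_1s_equidistant
  rw [pvPos_filterMap, pvPos_eq_posOf]
  obtain ⟨a, rest, hseg⟩ := List.exists_cons_of_ne_nil (pvSplit_ne_nil s.toList)
  rw [hseg]
  cases rest with
  | nil => simp [pvPosOf, pvInnerCheck]
  | cons b rest2 =>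
    cases rest2 with
    | nil => simp [pvPosOf, pvInnerCheck]
    | cons c t =>
      have hlen : ¬ (pvPosOf 0 (a :: b :: c :: t)).length < 2 := by
        rw [pvPosOf_length]; simp
      simp only [hlen, ite_false, pvInnerCheck]
      have hrest : (c :: t : List (List Char)) ≠ [] := by simp
      simp only [hrest, ite_false]
      have hpos : pvPosOf (0 : Int) (a :: b :: c :: t)
          = (0 + (a.length : Int)) :: (0 + (a.length : Int) + 1 + (b.length : Int))
              :: pvPosOf (0 + (a.length : Int) + 1 + (b.length : Int) + 1) (c :: t) := by
        simp [pvPosOf]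
      rw [hpos]
      rw [pvALoop_eq _ _ 2 (by omega)]
      simp only [List.drop_succ_cons, List.drop_zero, List.getD_cons_succ, List.getD_cons_zero]
      rw [pvGaps_posOf]
      have harith : (0 + (a.length : Int) + 1 + (b.length : Int)) - (0 + (a.length : Int))
          = 1 + (b.length : Int) := by ring
      rw [harith]
      refine List.all_congr rfl fun q => ?_
      by_cases hq : (q.length : Int) = (b.length : Int)
      · have hq2 : q.length = b.length := by exact_mod_cast hq
        simp [hq2]
      · have hq' : q.length ≠ b.length := by
          intro h'; exact hq (by exact_mod_cast h')
        have h1 : (1 + (q.length : Int)) ≠ 1 + (b.length : Int) := by omega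
        simp [hq', h1]

lemma pvSlice_one_negone {α : Type} (xs : List α) :
    PySem.List.slice xs (some 1) (some (-1)) = xs.tail.dropLast := by
  show List.take (PySem.List.clampIdx xs.length (-1) - PySem.List.clampIdx xs.length 1) (List.drop (PySem.List.clampIdx xs.length 1) xs) = _
  rw [PySem.List.clampIdx_neg_one]
  rw [show (1 : Int) = ((1 : Nat) : Int) from rfl, PySem.List.clampIdx_natCast]
  cases xs with
  | nil => simp
  | cons x t =>
    simp only [List.length_cons, min_eq_left (by omega : 1 ≤ t.length + 1)]
    simp only [List.drop_succ_cons, List.drop_zero, List.tail_cons]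
    rw [List.dropLast_eq_take]
    congr 1

lemma pvB_eq (s : String) : are_1s_equidistant_alt s = pvInnerCheck (pvSplit s.toList) := by
  unfold are_1s_equidistant_alt
  obtain ⟨parts, hparts, hmap⟩ :
      ∃ parts, PySem.Str.split? s "1" = some parts
        ∧ parts.map String.toList = pvSplit s.toList := by
    have h := PySem.Str.split?_map s "1"
    rw [show ("1" : String).toList = ['1'] from rfl] at h
    rw [show PySem.Chars.split? s.toList ['1'] = some (PySem.Chars.splitOn s.toList ['1']) by
      simp [PySem.Chars.split?]] at h
    rw [pvSplitOn_eq] at h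
    cases hsp : PySem.Str.split? s "1" with
    | none => rw [hsp] at h; simp at h
    | some parts =>
      rw [hsp] at h
      simp only [Option.map_some, Option.some.injEq] at h
      exact ⟨parts, rfl, h⟩
  rw [hparts]
  simp only
  rw [pvSlice_one_negone]
  have htl : (parts.tail.dropLast).map String.toList = (pvSplit s.toList).tail.dropLast := by
    rw [← hmap]; simp
  obtain ⟨a, rest, hseg⟩ := List.exists_cons_of_ne_nil (pvSplit_ne_nil s.toList)
  rw [hseg]
  rw [hseg] at htl
  cases rest with
  | nil =>
    have h0 : parts.tail.dropLast = [] := by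
      apply List.map_eq_nil_iff.mp; rw [htl]; simp
    rw [h0]; simp [pvInnerCheck]
  | cons b rest2 =>
    cases rest2 with
    | nil =>
      have h0 : parts.tail.dropLast = [] := by
        apply List.map_eq_nil_iff.mp; rw [htl]; simp
      rw [h0]; simp [pvInnerCheck]
    | cons c t =>
      have hne : parts.tail.dropLast ≠ [] := by
        intro h0; rw [h0] at htl
        simp [List.dropLast_cons_of_ne_nil] at htl
      obtain ⟨p, rest', hrest'⟩ := List.exists_cons_of_ne_nil hne
      rw [hrest']
      rw [hrest'] at htl
      simp only [List.map_cons, List.tail_cons,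
        List.dropLast_cons_of_ne_nil (by simp : (c :: t : List (List Char)) ≠ [])] at htl
      obtain ⟨hp, hr⟩ := List.cons_eq_cons.mp htl
      simp only [pvInnerCheck, (by simp : (c :: t : List (List Char)) ≠ []), ite_false]
      simp only [List.all_cons, PySem.Str.len, hp, beq_self_eq_true, Bool.true_and]
      rw [← hr, List.all_map]
      refine List.all_congr rfl fun q => ?_
      simp [Function.comp]

-- ===== VERDICT (by name: the statement is the Claim_ definition above) =====
theorem are_1s_equidistant_spec : Claim_equal_are_1s_equidistant := by
  intro s _
  unfold Spec_are_1s_equidistant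
  rw [pvA_eq, pvB_eq]
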